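-- pv_equiv track=rewrite | github.com/Konubinix/Devel | init_bin/konix_get_env.py | mergeItemsOfSection
-- ===== SOURCE A (Python) =====
-- def mergeItemsOfSection(items):
--     # this method assumes that the items are unique
--     new_items = {}
--     items_keys = []
--     for key,value in items:
--         if new_items.get(key) == None:
--             new_items[key] = value
--         else:
--             new_items[key] = "".join((new_items[key],value,))
--         items_keys.append(key)
--     return (new_items, items_keys,)
-- ===== SOURCE B (Python) =====
-- def mergeItemsOfSection(items):
--     # this method assumes that the items are unique
--     # B: record the full key sequence, then build the merged dict in a second
--     # staged pass: for each first-occurrence key, join all its values at once.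
--     items_keys = [key for key, _ in items]
--     new_items = {key: "".join(value for k, value in items if k == key)
--                  for key in dict.fromkeys(items_keys)}
--     return (new_items, items_keys)
-- ===== Notes on version B (the rewrite author's own statement) =====
-- stated objective: alternative
-- what changed: B replaces A's single pass with an incrementally-updated dict (get/else branch and repeated concatenation) by two staged passes: collect the key sequence, then for each distinct key in first-occurrence order join all of its values in one filter+join.
import Mathlib
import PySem

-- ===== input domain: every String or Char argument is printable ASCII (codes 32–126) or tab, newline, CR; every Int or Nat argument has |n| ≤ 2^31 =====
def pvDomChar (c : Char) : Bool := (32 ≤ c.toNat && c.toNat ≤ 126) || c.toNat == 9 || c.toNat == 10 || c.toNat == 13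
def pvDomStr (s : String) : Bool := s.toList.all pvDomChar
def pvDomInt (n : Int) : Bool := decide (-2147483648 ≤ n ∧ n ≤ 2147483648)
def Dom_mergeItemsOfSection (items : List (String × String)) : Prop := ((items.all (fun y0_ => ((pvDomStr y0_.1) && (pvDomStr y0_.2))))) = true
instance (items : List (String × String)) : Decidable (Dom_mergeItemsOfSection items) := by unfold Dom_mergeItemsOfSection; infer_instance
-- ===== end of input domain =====

-- B builds the result in two staged passes (key sequence, then one filter+join per
-- first-occurrence key) instead of A's single pass over an incrementally-updated dict
-- (objective: alternative).
-- ===== PORT A =====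
def mergeItemsOfSection (items : List (String × String)) : (List (String × String)) × List String :=
  let st := items.foldl
    (fun (st : PySem.Dict String String × List String) kv =>
      (st.1.insert kv.1
        (match st.1.get? kv.1 with
         | none => kv.2
         | some s => PySem.Str.join "" [s, kv.2]),
       st.2 ++ [kv.1]))
    (PySem.Dict.empty, [])
  (st.1.items, st.2)

-- ===== PORT B =====
def mergeItemsOfSection_alt (items : List (String × String)) : (List (String × String)) × List String :=
  let items_keys := items.map (·.1)
  let new_items := (PySem.List.dedup items_keys).map
    (fun key => (key, PySem.Str.join "" ((items.filter (fun p => p.1 == key)).map (·.2))))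
  (new_items, items_keys)

-- ===== PRECONDITION & SPEC =====
def Spec_mergeItemsOfSection (items : List (String × String)) (out : (List (String × String)) × List String) : Prop := out = mergeItemsOfSection_alt items
instance (items : List (String × String)) (out : (List (String × String)) × List String) : Decidable (Spec_mergeItemsOfSection items out) := by unfold Spec_mergeItemsOfSection; infer_instance

-- ===== CLAIM (what is proved, stated in full; the proofs are below) =====
def Claim_equal_mergeItemsOfSection : Prop := ∀ (items : List (String × String)), Dom_mergeItemsOfSection items → Spec_mergeItemsOfSection items (mergeItemsOfSection items)

-- ===== LEMMAS AND PROOFS =====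
theorem flatten_intersperse_nil {α : Type} (l : List (List α)) :
    (List.intersperse [] l).flatten = l.flatten := by
  induction l with
  | nil => rfl
  | cons a l ih =>
    cases l with
    | nil => rfl
    | cons b t => simp_all [List.intersperse]

theorem join_empty_cons (s : String) (parts : List String) :
    PySem.Str.join "" (s :: parts) = s ++ PySem.Str.join "" parts := by
  simp only [PySem.Str.join, PySem.Chars.join, List.intercalate, List.map_cons,
    show ("" : String).toList = ([] : List Char) from rfl,
    flatten_intersperse_nil, List.flatten_cons]
  rw [String.ofList_append, String.ofList_toList]

theorem join_empty_nil : PySem.Str.join "" ([] : List String) = "" := rfl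

-- the dict-only fold of A's loop
def foldA (l : List (String × String)) (d : PySem.Dict String String) : PySem.Dict String String :=
  l.foldl
    (fun d kv => d.insert kv.1
      (match d.get? kv.1 with
       | none => kv.2
       | some s => PySem.Str.join "" [s, kv.2])) d

theorem pairA (l : List (String × String)) (d : PySem.Dict String String) (ks : List String) :
    l.foldl
      (fun (st : PySem.Dict String String × List String) kv =>
        (st.1.insert kv.1
          (match st.1.get? kv.1 with
           | none => kv.2
           | some s => PySem.Str.join "" [s, kv.2]),
         st.2 ++ [kv.1])) (d, ks)
      = (foldA l d, ks ++ l.map (·.1)) := by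
  induction l generalizing d ks with
  | nil => simp [foldA]
  | cons a t ih => simp [foldA, List.foldl_cons, ih]

theorem getD_foldA (l : List (String × String)) (d : PySem.Dict String String) (k : String) :
    (foldA l d).getD k "" = d.getD k "" ++ PySem.Str.join "" ((l.filter (fun p => p.1 == k)).map (·.2)) := by
  induction l generalizing d with
  | nil => simp [foldA, join_empty_nil]
  | cons a t ih =>
    have hstep : (foldA (a :: t) d) = foldA t
        (d.insert a.1 (match d.get? a.1 with
          | none => a.2
          | some s => PySem.Str.join "" [s, a.2])) := rfl
    rw [hstep, ih]
    by_cases hk : a.1 = k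
    · subst hk
      rw [PySem.Dict.getD_insert_self]
      have hv : (match d.get? a.1 with
          | none => a.2
          | some s => PySem.Str.join "" [s, a.2]) = d.getD a.1 "" ++ a.2 := by
        cases h : d.get? a.1 with
        | none => simp [PySem.Dict.getD_eq_get?_getD, h]
        | some s => simp [PySem.Dict.getD_eq_get?_getD, h, join_empty_cons, join_empty_nil]
      rw [hv]
      simp [join_empty_cons, String.append_assoc]
    · rw [PySem.Dict.getD_insert, if_neg (fun h => hk h.symm)]
      simp [hk]

theorem keysA (l : List (String × String)) :
    (foldA l PySem.Dict.empty).keys = PySem.List.dedup (l.map (·.1)) := by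
  rw [show (foldA l PySem.Dict.empty).keys = PySem.Set.update PySem.Dict.empty.keys (l.map (·.1)) from
        PySem.Dict.keys_foldl_insert_key l (·.1) _ PySem.Dict.empty]
  simp [PySem.List.dedup_eq_ofList]
  rfl

theorem nodupA (l : List (String × String)) : (foldA l PySem.Dict.empty).keys.Nodup :=
  PySem.Dict.nodup_keys_foldl_insert_key l (·.1) _ PySem.Dict.empty PySem.Dict.nodup_keys_empty

theorem items_foldA (l : List (String × String)) :
    (foldA l PySem.Dict.empty).items
      = (PySem.List.dedup (l.map (·.1))).map
          (fun key => (key, PySem.Str.join "" ((l.filter (fun p => p.1 == key)).map (·.2)))) := by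
  rw [PySem.Dict.items_eq_map_keys _ (nodupA l) "", keysA]
  refine List.map_congr_left (fun k _ => ?_)
  rw [getD_foldA]
  simp [PySem.Dict.getD_empty]

-- ===== VERDICT (by name: the statement is the Claim_ definition above) =====
theorem mergeItemsOfSection_spec : Claim_equal_mergeItemsOfSection := by
  intro items _
  unfold Spec_mergeItemsOfSection mergeItemsOfSection mergeItemsOfSection_alt
  rw [pairA]
  simp [items_foldA]
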